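-- pv_equiv track=rewrite | github.com/DanielMerritt/Advent-of-Code | 2025/day5.py | part2
-- ===== SOURCE A (Python) =====
-- def part2(puzzle_input: tuple[list[str], list[str]]) -> int:
--     intervals: list[tuple[int, int]] = []
--     for id_range in puzzle_input[0]:
--         lower_bound, upper_bound = map(int, id_range.split("-"))
--         intervals.append((lower_bound, upper_bound))
--     intervals.sort(key=lambda x: x[0])
--     merged_ranges: list[list[int]] = []
--     for start, end in intervals:
--         if not merged_ranges:
--             merged_ranges.append([start, end])
--             continue
--         _, previous_end = merged_ranges[-1]
--         if start > previous_end + 1: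
--             merged_ranges.append([start, end])
--         else:
--             merged_ranges[-1][1] = max(previous_end, end)
--     total = 0
--     for start, end in merged_ranges:
--         total += end - start + 1
--     return total
-- ===== SOURCE B (Python) =====
-- def part2(puzzle_input):
--     events = []
--     for id_range in puzzle_input[0]:
--         lower_bound, upper_bound = map(int, id_range.split("-"))
--         if lower_bound <= upper_bound:
--             events.append((lower_bound, 1))
--             events.append((upper_bound + 1, -1))
--     events.sort(key=lambda e: e[0])
--     total = 0
--     active = 0
--     prev = 0
--     for pos, delta in events:
--         if active > 0:
--             total += pos - prev
--         active += delta
--         prev = pos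
--     return total
-- ===== Notes on version B (the rewrite author's own statement) =====
-- stated objective: alternative
-- what changed: Replaces sort-then-merge-intervals-into-a-list with a boundary-event sweep (emit (start,+1) and (end+1,-1), sort, accumulate gap lengths while the overlap counter is positive); Pre_ excludes lines that fail int parsing/unpacking (A raises ValueError) and inputs containing an inverted range a-b with b < a, a malformed corner no format specifies, where A's end-start+1 arithmetic and B's covered-integer count are equally accidental answers.
-- outside the precondition, e.g. on part2((['5-3'], [])): A returns -1, B returns 0; on part2((['1-10', '5-3'], [])): A returns 10, B returns 10
import Mathlib
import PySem

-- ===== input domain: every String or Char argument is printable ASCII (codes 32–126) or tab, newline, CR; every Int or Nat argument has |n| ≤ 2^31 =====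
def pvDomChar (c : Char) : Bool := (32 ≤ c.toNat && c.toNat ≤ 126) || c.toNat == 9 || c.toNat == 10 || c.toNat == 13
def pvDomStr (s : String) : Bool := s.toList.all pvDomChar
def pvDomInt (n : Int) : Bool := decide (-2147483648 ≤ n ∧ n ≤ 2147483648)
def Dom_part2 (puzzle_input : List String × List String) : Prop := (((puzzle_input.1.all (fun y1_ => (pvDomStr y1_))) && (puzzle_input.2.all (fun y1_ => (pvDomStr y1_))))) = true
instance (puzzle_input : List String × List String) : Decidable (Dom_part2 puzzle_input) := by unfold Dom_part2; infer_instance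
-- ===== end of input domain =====

-- B replaces A's sort-then-merge interval list by a boundary-event sweep (same cost class).
-- Both share the same parsing of "lo-hi" lines, factored here.
def parseRange (s : String) : Option (Int × Int) :=
  match PySem.Str.split? s "-" with
  | some [a, b] =>
    match PySem.Int.ofStr? a, PySem.Int.ofStr? b with
    | some lo, some hi => some (lo, hi)
    | _, _ => none
  | _ => none

-- ===== PORT A =====
-- one iteration of A's merge loop over the already-sorted intervals
def mergeStep (ms : List (Int × Int)) (p : Int × Int) : List (Int × Int) :=
  match ms.getLast? with
  | none => ms ++ [p]
  | some (ps, pe) =>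
    if p.1 > pe + 1 then ms ++ [p]
    else ms.dropLast ++ [(ps, max pe p.2)]

def part2 (puzzle_input : List String × List String) : Int :=
  -- lines that do not parse make Python raise ValueError; they are outside Pre_ (here: skipped)
  let intervals := puzzle_input.1.foldl
    (fun acc s => match parseRange s with
      | some p => acc ++ [p]
      | none => acc) []
  let sortedIntervals := PySem.List.sorted intervals (fun x => x.1) false
  let merged := sortedIntervals.foldl mergeStep []
  merged.foldl (fun total p => total + (p.2 - p.1 + 1)) 0

-- ===== PORT B =====
def part2_alt (puzzle_input : List String × List String) : Int :=
  let events := puzzle_input.1.foldl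
    (fun acc s => match parseRange s with
      | some (lo, hi) =>
        if lo ≤ hi then acc ++ [(lo, (1 : Int)), (hi + 1, (-1 : Int))] else acc
      | none => acc) []
  let es := PySem.List.sorted events (fun e => e.1) false
  let st := es.foldl
    (fun (st : Int × Int × Int) e =>
      (if st.2.1 > 0 then st.1 + (e.1 - st.2.2) else st.1, st.2.1 + e.2, e.1))
    (0, 0, 0)
  st.1

-- ===== PRECONDITION & SPEC =====
-- Pre_ excludes (a) lines Python's int()/unpacking rejects — there A raises ValueError —
-- and (b) inputs containing an inverted range "a-b" with b < a, a malformed corner the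
-- puzzle format never specifies, on which A's end-start+1 merge arithmetic and B's
-- count of covered integers are two accidental, equally unspecified answers.
def Pre_part2 (puzzle_input : List String × List String) : Prop :=
  (puzzle_input.1.all (fun s =>
    match parseRange s with
    | some (lo, hi) => decide (lo ≤ hi)
    | none => false)) = true
instance (puzzle_input : List String × List String) : Decidable (Pre_part2 puzzle_input) := by unfold Pre_part2; infer_instance
def pvWitness_part2 : (List String × List String) := (["1-2", "4-10"], [])

def Spec_part2 (puzzle_input : List String × List String) (out : Int) : Prop := out = part2_alt puzzle_input
instance (puzzle_input : List String × List String) (out : Int) : Decidable (Spec_part2 puzzle_input out) := by unfold Spec_part2; infer_instance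

-- ===== CLAIM (what is proved, stated in full; the proofs are below) =====
def Claim_equal_part2 : Prop := ∀ (puzzle_input : List String × List String), Dom_part2 puzzle_input → Pre_part2 puzzle_input → Spec_part2 puzzle_input (part2 puzzle_input)

-- ===== LEMMAS AND PROOFS =====

-- the parsed interval list both ports work from
def parsedL (lines : List String) : List (Int × Int) := lines.filterMap parseRange

-- union of the intervals, as a finite set of integers (proof-side only)
noncomputable def U (L : List (Int × Int)) : Finset ℤ :=
  L.foldr (fun p s => Finset.Icc p.1 p.2 ∪ s) ∅

theorem U_nil : U [] = ∅ := rfl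
theorem U_cons (p : Int × Int) (L : List (Int × Int)) :
    U (p :: L) = Finset.Icc p.1 p.2 ∪ U L := rfl

def sumLen (ms : List (Int × Int)) : Int := (ms.map (fun p => p.2 - p.1 + 1)).sum

def evf (p : Int × Int) : List (Int × Int) :=
  if p.1 ≤ p.2 then [(p.1, (1 : Int)), (p.2 + 1, (-1 : Int))] else []

-- sum of the deltas of the events at positions ≤ x
def F (es : List (Int × Int)) (x : Int) : Int :=
  ((es.filter (fun e => decide (e.1 ≤ x))).map (fun e => e.2)).sum

-- position of the last event, with a default
def lastPos : List (Int × Int) → Int → Int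
  | [], d => d
  | e :: es, _ => lastPos es e.1

theorem foldl_parse_append (lines : List String) (acc : List (Int × Int)) :
    lines.foldl (fun acc s => match parseRange s with
      | some p => acc ++ [p]
      | none => acc) acc = acc ++ parsedL lines := by
  induction lines generalizing acc with
  | nil => simp [parsedL]
  | cons s ls ih =>
    cases h : parseRange s with
    | none => simp [List.foldl_cons, h, ih, parsedL]
    | some p => simp [List.foldl_cons, h, ih, parsedL]

theorem foldl_events_append (lines : List String) (acc : List (Int × Int)) :
    lines.foldl (fun acc s => match parseRange s with
      | some (lo, hi) =>
        if lo ≤ hi then acc ++ [(lo, (1 : Int)), (hi + 1, (-1 : Int))] else acc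
      | none => acc) acc = acc ++ (parsedL lines).flatMap evf := by
  induction lines generalizing acc with
  | nil => simp [parsedL]
  | cons s ls ih =>
    cases h : parseRange s with
    | none => simp [List.foldl_cons, h, ih, parsedL]
    | some p =>
      obtain ⟨lo, hi⟩ := p
      by_cases hlh : lo ≤ hi
      · simp [List.foldl_cons, h, hlh, ih, parsedL, evf]
      · simp [List.foldl_cons, h, hlh, ih, parsedL, evf]

theorem mem_U (L : List (Int × Int)) (x : Int) :
    x ∈ U L ↔ ∃ p ∈ L, p.1 ≤ x ∧ x ≤ p.2 := by
  induction L with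
  | nil => simp [U_nil]
  | cons p L ih =>
    simp only [U_cons, Finset.mem_union, Finset.mem_Icc, ih, List.mem_cons]
    constructor
    · rintro (h | ⟨q, hq, h1, h2⟩)
      · exact ⟨p, Or.inl rfl, h.1, h.2⟩
      · exact ⟨q, Or.inr hq, h1, h2⟩
    · rintro ⟨q, (rfl | hq), h1, h2⟩
      · exact Or.inl ⟨h1, h2⟩
      · exact Or.inr ⟨q, hq, h1, h2⟩

theorem U_append (L1 L2 : List (Int × Int)) : U (L1 ++ L2) = U L1 ∪ U L2 := by
  induction L1 with
  | nil => simp [U_nil]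
  | cons p L ih => simp [U_cons, ih, Finset.union_assoc]

theorem U_perm {L1 L2 : List (Int × Int)} (h : L1.Perm L2) : U L1 = U L2 := by
  ext x
  simp only [mem_U]
  constructor
  · rintro ⟨p, hp, h1, h2⟩; exact ⟨p, h.mem_iff.mp hp, h1, h2⟩
  · rintro ⟨p, hp, h1, h2⟩; exact ⟨p, h.mem_iff.mpr hp, h1, h2⟩

theorem foldl_total_sumLen (ms : List (Int × Int)) (t : Int) :
    ms.foldl (fun total p => total + (p.2 - p.1 + 1)) t = t + sumLen ms := by
  induction ms generalizing t with
  | nil => simp [sumLen]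
  | cons p ms ih => simp [List.foldl_cons, ih, sumLen]; ring

theorem merge_loop (rest : List (Int × Int)) : ∀ (ms : List (Int × Int)) (s e : Int),
    ms.getLast? = some (s, e) → s ≤ e → (∀ p ∈ ms, p.2 ≤ e) →
    sumLen ms = ((U ms).card : Int) →
    (∀ p ∈ rest, s ≤ p.1 ∧ p.1 ≤ p.2) →
    rest.Pairwise (fun a b => a.1 ≤ b.1) →
    sumLen (rest.foldl mergeStep ms) = (((U ms ∪ U rest).card : Nat) : Int) := by
  induction rest with
  | nil => intro ms s e _ _ _ hcard _ _; simpa [U_nil] using hcard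
  | cons q rest ih =>
    intro ms s e hlast hse hle hcard hrest hsorted
    obtain ⟨l, h⟩ := q
    have hsl : s ≤ l := (hrest (l, h) (List.mem_cons_self ..)).1
    have hlh : l ≤ h := (hrest (l, h) (List.mem_cons_self ..)).2
    have hpair := List.pairwise_cons.mp hsorted
    have hrest' : ∀ p ∈ rest, l ≤ p.1 ∧ p.1 ≤ p.2 := by
      intro p hp
      exact ⟨hpair.1 p hp, (hrest p (List.mem_cons_of_mem _ hp)).2⟩
    have hxle : ∀ x ∈ U ms, x ≤ e := by
      intro x hx
      obtain ⟨p, hp, h1, h2⟩ := (mem_U ms x).mp hx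
      exact le_trans h2 (hle p hp)
    obtain ⟨ms', hms⟩ := List.getLast?_eq_some_iff.mp hlast
    rw [List.foldl_cons]
    by_cases hgt : l > e + 1
    · have hstep : mergeStep ms (l, h) = ms ++ [(l, h)] := by
        simp [mergeStep, hlast, hgt]
      have hUm : U (ms ++ [(l, h)]) = U ms ∪ Finset.Icc l h := by
        simp [U_append, U_cons, U_nil]
      have hdisj : Disjoint (U ms) (Finset.Icc l h) := by
        rw [Finset.disjoint_left]
        intro x hx hx2
        have h1 := hxle x hx
        have h2 := (Finset.mem_Icc.mp hx2).1
        omega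
      have hcard' : sumLen (ms ++ [(l, h)]) = ((U (ms ++ [(l, h)])).card : Int) := by
        have hsums : sumLen (ms ++ [(l, h)]) = sumLen ms + (h - l + 1) := by
          simp [sumLen]
        rw [hUm, Finset.card_union_of_disjoint hdisj, hsums, hcard]
        push_cast [Int.card_Icc]
        omega
      have hle' : ∀ p ∈ ms ++ [(l, h)], p.2 ≤ h := by
        intro p hp
        rcases List.mem_append.mp hp with h1 | h1
        · have := hle p h1; omega
        · simp at h1; rw [h1]
      rw [hstep, ih (ms ++ [(l, h)]) l h (by simp) hlh hle' hcard' hrest' hpair.2]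
      congr 1
      rw [hUm, U_cons, Finset.union_assoc]
    · have hstep : mergeStep ms (l, h) = ms' ++ [(s, max e h)] := by
        simp only [mergeStep, hlast]
        rw [if_neg hgt, hms, List.dropLast_concat]
      have hUmseq : U ms = U ms' ∪ Finset.Icc s e := by
        rw [hms, U_append, U_cons, U_nil, Finset.union_empty]
      have hU' : U (ms' ++ [(s, max e h)]) = U ms ∪ Finset.Icc l h := by
        rw [U_append, U_cons, U_nil, Finset.union_empty, hUmseq, Finset.union_assoc]
        congr 1
        ext x
        simp only [Finset.mem_union, Finset.mem_Icc, le_max_iff]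
        omega
      have hUcalc : U ms ∪ Finset.Icc l h = U ms ∪ Finset.Icc (e + 1) (max e h) := by
        ext x
        simp only [Finset.mem_union, Finset.mem_Icc, le_max_iff]
        by_cases hA : x ∈ U ms
        · simp [hA]
        · simp only [hA, false_or]
          constructor
          · rintro ⟨h1, h2⟩
            have hxe : ¬ (x ≤ e) := by
              intro hxe
              exact hA (by
                rw [hUmseq]
                exact Finset.mem_union_right _ (Finset.mem_Icc.mpr ⟨by omega, hxe⟩))
            omega
          · rintro ⟨h1, h2⟩
            omega
      have hdisj : Disjoint (U ms) (Finset.Icc (e + 1) (max e h)) := by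
        rw [Finset.disjoint_left]
        intro x hx hx2
        have h1 := hxle x hx
        have h2 := (Finset.mem_Icc.mp hx2).1
        omega
      have hcard' : sumLen (ms' ++ [(s, max e h)]) = ((U (ms' ++ [(s, max e h)])).card : Int) := by
        have hsums : sumLen (ms' ++ [(s, max e h)]) = sumLen ms' + (max e h - s + 1) := by
          simp [sumLen]
        have hsums0 : sumLen ms = sumLen ms' + (e - s + 1) := by
          rw [hms]; simp [sumLen]
        rw [hcard] at hsums0
        rw [hU', hUcalc, Finset.card_union_of_disjoint hdisj, hsums]
        rcases le_total e h with hc | hc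
        · rw [max_eq_right hc]
          push_cast [Int.card_Icc]
          omega
        · rw [max_eq_left hc]
          push_cast [Int.card_Icc]
          omega
      have hle' : ∀ p ∈ ms' ++ [(s, max e h)], p.2 ≤ max e h := by
        intro p hp
        rcases List.mem_append.mp hp with h1 | h1
        · have hpm : p ∈ ms := by rw [hms]; exact List.mem_append_left _ h1
          have := hle p hpm
          have := le_max_left e h
          omega
        · simp at h1; rw [h1]
      have hrest'' : ∀ p ∈ rest, s ≤ p.1 ∧ p.1 ≤ p.2 := by
        intro p hp
        exact ⟨le_trans hsl (hpair.1 p hp), (hrest p (List.mem_cons_of_mem _ hp)).2⟩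
      rw [hstep, ih (ms' ++ [(s, max e h)]) s (max e h) (by simp)
        (le_trans hse (le_max_left e h)) hle' hcard' hrest'' hpair.2]
      congr 1
      rw [hU', U_cons, Finset.union_assoc]

theorem merge_total (S : List (Int × Int))
    (hvalid : ∀ p ∈ S, p.1 ≤ p.2)
    (hsorted : S.Pairwise (fun a b => a.1 ≤ b.1)) :
    sumLen (S.foldl mergeStep []) = ((U S).card : Int) := by
  cases S with
  | nil => simp [sumLen, U_nil]
  | cons p S =>
    have hpair := List.pairwise_cons.mp hsorted
    have hpv := hvalid p (List.mem_cons_self ..)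
    rw [List.foldl_cons]
    have hstep : mergeStep [] p = [p] := rfl
    rw [hstep]
    have hcard : sumLen [p] = ((U [p]).card : Int) := by
      simp [sumLen, U_cons, U_nil, Int.card_Icc]
      omega
    have hrest : ∀ q ∈ S, p.1 ≤ q.1 ∧ q.1 ≤ q.2 := by
      intro q hq
      exact ⟨hpair.1 q hq, hvalid q (List.mem_cons_of_mem _ hq)⟩
    rw [merge_loop S [p] p.1 p.2 rfl hpv (by intro q hq; simp at hq; rw [hq]) hcard hrest hpair.2]
    congr 1
    rw [U_cons, U_cons, U_nil, Finset.union_empty]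

theorem F_cons (e : Int × Int) (es : List (Int × Int)) (x : Int) :
    F (e :: es) x = (if e.1 ≤ x then e.2 else 0) + F es x := by
  simp only [F, List.filter_cons]
  by_cases h : e.1 ≤ x
  · simp [h]
  · simp [h]

theorem F_append (es1 es2 : List (Int × Int)) (x : Int) :
    F (es1 ++ es2) x = F es1 x + F es2 x := by
  simp [F, List.filter_append]

theorem F_perm {es1 es2 : List (Int × Int)} (h : es1.Perm es2) (x : Int) :
    F es1 x = F es2 x := by
  exact List.Perm.sum_eq (List.Perm.map _ (List.Perm.filter _ h))

theorem lastPos_ge (es : List (Int × Int)) : ∀ (d : Int),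
    es.Pairwise (fun a b => a.1 ≤ b.1) → (∀ e ∈ es, d ≤ e.1) → d ≤ lastPos es d := by
  induction es with
  | nil => intro d _ _; exact le_refl d
  | cons e es ih =>
    intro d hs hged
    have hpair := List.pairwise_cons.mp hs
    have h1 : d ≤ e.1 := hged e (List.mem_cons_self ..)
    have h2 : e.1 ≤ lastPos es e.1 := ih e.1 hpair.2 hpair.1
    calc d ≤ e.1 := h1
      _ ≤ lastPos es e.1 := h2

theorem lastPos_mem_le (es : List (Int × Int)) : ∀ (d : Int),
    es.Pairwise (fun a b => a.1 ≤ b.1) → ∀ f ∈ es, f.1 ≤ lastPos es d := by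
  induction es with
  | nil => intro d _ f hf; simp at hf
  | cons e es ih =>
    intro d hs f hf
    have hpair := List.pairwise_cons.mp hs
    rcases List.mem_cons.mp hf with rfl | hf'
    · exact lastPos_ge es f.1 hpair.2 hpair.1
    · exact ih e.1 hpair.2 f hf'

theorem F_zero_of_lt (es : List (Int × Int)) (x : Int)
    (h : ∀ f ∈ es, x < f.1) : F es x = 0 := by
  have : es.filter (fun e => decide (e.1 ≤ x)) = [] := by
    rw [List.filter_eq_nil_iff]
    intro f hf
    simp
    have := h f hf
    omega
  simp [F, this]

theorem sweep_loop (es : List (Int × Int)) : ∀ (prev active total : Int),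
    es.Pairwise (fun a b => a.1 ≤ b.1) → (∀ e ∈ es, prev ≤ e.1) →
    (es.foldl (fun (st : Int × Int × Int) e =>
      (if st.2.1 > 0 then st.1 + (e.1 - st.2.2) else st.1, st.2.1 + e.2, e.1))
      (total, active, prev)).1
    = total + (((Finset.Ico prev (lastPos es prev)).filter
        (fun x => 0 < active + F es x)).card : Int) := by
  induction es with
  | nil => intro prev active total _ _; simp [lastPos]
  | cons e es ih =>
    intro prev active total hs hge
    have hpair := List.pairwise_cons.mp hs
    have hprev_e : prev ≤ e.1 := hge e (List.mem_cons_self ..)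
    have hM : e.1 ≤ lastPos es e.1 := lastPos_ge es e.1 hpair.2 hpair.1
    rw [List.foldl_cons]
    suffices hsuf : (es.foldl (fun (st : Int × Int × Int) e =>
        (if st.2.1 > 0 then st.1 + (e.1 - st.2.2) else st.1, st.2.1 + e.2, e.1))
        ((if active > 0 then total + (e.1 - prev) else total), active + e.2, e.1)).1
        = total + (((Finset.Ico prev (lastPos (e :: es) prev)).filter
            (fun x => 0 < active + F (e :: es) x)).card : Int) by exact hsuf
    rw [ih e.1 (active + e.2) _ hpair.2 hpair.1]
    have hlp : lastPos (e :: es) prev = lastPos es e.1 := rfl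
    rw [hlp]
    have hsplit : Finset.Ico prev (lastPos es e.1)
        = Finset.Ico prev e.1 ∪ Finset.Ico e.1 (lastPos es e.1) :=
      (Finset.Ico_union_Ico_eq_Ico hprev_e hM).symm
    have hdisjf : Disjoint
        ((Finset.Ico prev e.1).filter (fun x => 0 < active + F (e :: es) x))
        ((Finset.Ico e.1 (lastPos es e.1)).filter (fun x => 0 < active + F (e :: es) x)) :=
      Finset.disjoint_filter_filter (Finset.Ico_disjoint_Ico_consecutive prev e.1 _)
    rw [hsplit, Finset.filter_union, Finset.card_union_of_disjoint hdisjf]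
    have hF0 : ∀ x : Int, x < e.1 → F (e :: es) x = 0 := by
      intro x hx
      apply F_zero_of_lt
      intro f hf
      rcases List.mem_cons.mp hf with rfl | hf'
      · exact hx
      · have := hpair.1 f hf'; omega
    have h1 : (Finset.Ico prev e.1).filter (fun x => 0 < active + F (e :: es) x)
        = if 0 < active then Finset.Ico prev e.1 else (∅ : Finset ℤ) := by
      split_ifs with ha
      · apply Finset.filter_true_of_mem
        intro x hx
        rw [hF0 x (Finset.mem_Ico.mp hx).2]
        omega
      · rw [Finset.filter_false_of_mem]
        intro x hx
        rw [hF0 x (Finset.mem_Ico.mp hx).2]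
        omega
    have h2 : (Finset.Ico e.1 (lastPos es e.1)).filter (fun x => 0 < active + F (e :: es) x)
        = (Finset.Ico e.1 (lastPos es e.1)).filter (fun x => 0 < active + e.2 + F es x) := by
      apply Finset.filter_congr
      intro x hx
      rw [F_cons, if_pos (Finset.mem_Ico.mp hx).1]
      constructor <;> intro <;> omega
    rw [h1, h2]
    split_ifs with ha <;> simp [Int.card_Ico] <;> omega

theorem F_events (L : List (Int × Int)) (hvalid : ∀ p ∈ L, p.1 ≤ p.2) (x : Int) :
    F (L.flatMap evf) x = ((L.countP (fun p => decide (p.1 ≤ x ∧ x ≤ p.2)) : Nat) : Int) := by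
  induction L with
  | nil => simp [F]
  | cons p L ih =>
    have hpv := hvalid p (List.mem_cons_self ..)
    have ih' := ih (fun q hq => hvalid q (List.mem_cons_of_mem _ hq))
    rw [List.flatMap_cons, F_append, ih', List.countP_cons]
    have hev : evf p = [(p.1, (1 : Int)), (p.2 + 1, (-1 : Int))] := by
      simp [evf, hpv]
    rw [hev, F_cons, F_cons]
    simp only [F]
    split_ifs <;> push_cast <;> simp_all <;> omega

theorem sweep_total (L : List (Int × Int)) (hvalid : ∀ p ∈ L, p.1 ≤ p.2) :
    ((PySem.List.sorted (L.flatMap evf) (fun e => e.1) false).foldl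
      (fun (st : Int × Int × Int) e =>
        (if st.2.1 > 0 then st.1 + (e.1 - st.2.2) else st.1, st.2.1 + e.2, e.1))
      (0, 0, 0)).1 = ((U L).card : Int) := by
  have hperm : (PySem.List.sorted (L.flatMap evf) (fun e => e.1) false).Perm (L.flatMap evf) :=
    PySem.List.sorted_perm _ _ _
  have hpairall : (PySem.List.sorted (L.flatMap evf) (fun e => e.1) false).Pairwise
      (fun a b => a.1 ≤ b.1) := PySem.List.sorted_pairwise _ _
  cases hE : PySem.List.sorted (L.flatMap evf) (fun e => e.1) false with
  | nil =>
    rw [hE] at hperm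
    have hfm : L.flatMap evf = [] := hperm.nil_eq.symm
    have hL : L = [] := by
      cases L with
      | nil => rfl
      | cons p L =>
        exfalso
        have hpv := hvalid p (List.mem_cons_self ..)
        rw [List.flatMap_cons] at hfm
        have : evf p = [(p.1, (1 : Int)), (p.2 + 1, (-1 : Int))] := by simp [evf, hpv]
        rw [this] at hfm
        simp at hfm
    rw [hL]
    simp [U_nil]
  | cons e es =>
    rw [hE] at hperm hpairall
    have hpair := List.pairwise_cons.mp hpairall
    rw [List.foldl_cons]
    suffices hsuf : (es.foldl (fun (st : Int × Int × Int) e =>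
        (if st.2.1 > 0 then st.1 + (e.1 - st.2.2) else st.1, st.2.1 + e.2, e.1))
        ((0 : Int), 0 + e.2, e.1)).1 = ((U L).card : Int) by exact hsuf
    rw [sweep_loop es e.1 (0 + e.2) 0 hpair.2 hpair.1]
    have hFeq : ∀ x : Int, F (e :: es) x
        = ((L.countP (fun p => decide (p.1 ≤ x ∧ x ≤ p.2)) : Nat) : Int) := by
      intro x
      rw [F_perm hperm, F_events L hvalid]
    have h2 : (Finset.Ico e.1 (lastPos es e.1)).filter (fun x => 0 < 0 + e.2 + F es x)
        = (Finset.Ico e.1 (lastPos es e.1)).filter (fun x => 0 < F (e :: es) x) := by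
      apply Finset.filter_congr
      intro x hx
      rw [F_cons, if_pos (Finset.mem_Ico.mp hx).1]
      constructor <;> intro <;> omega
    rw [h2]
    have hset : (Finset.Ico e.1 (lastPos es e.1)).filter (fun x => 0 < F (e :: es) x) = U L := by
      ext x
      simp only [Finset.mem_filter, Finset.mem_Ico, mem_U]
      constructor
      · rintro ⟨⟨hx1, hx2⟩, hpos⟩
        rw [hFeq] at hpos
        have hcp : 0 < L.countP (fun p => decide (p.1 ≤ x ∧ x ≤ p.2)) := by exact_mod_cast hpos
        obtain ⟨p, hp, hcond⟩ := List.countP_pos_iff.mp hcp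
        simp at hcond
        exact ⟨p, hp, hcond.1, hcond.2⟩
      · rintro ⟨p, hp, h1, h2'⟩
        have hpv := hvalid p hp
        have hmem1 : (p.1, (1 : Int)) ∈ (e :: es) := by
          rw [hperm.mem_iff]
          exact List.mem_flatMap.mpr ⟨p, hp, by simp [evf, hpv]⟩
        have hmem2 : (p.2 + 1, (-1 : Int)) ∈ (e :: es) := by
          rw [hperm.mem_iff]
          exact List.mem_flatMap.mpr ⟨p, hp, by simp [evf, hpv]⟩
        have he1 : e.1 ≤ p.1 := by
          rcases List.mem_cons.mp hmem1 with heq | hm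
          · rw [← heq]
          · exact hpair.1 (p.1, (1 : Int)) hm
        have hlt : p.2 + 1 ≤ lastPos es e.1 := by
          have := lastPos_mem_le (e :: es) e.1 hpairall (p.2 + 1, (-1 : Int)) hmem2
          exact this
        refine ⟨⟨by omega, by omega⟩, ?_⟩
        rw [hFeq]
        have hcp : 0 < L.countP (fun p => decide (p.1 ≤ x ∧ x ≤ p.2)) :=
          List.countP_pos_iff.mpr ⟨p, hp, by simp [h1, h2']⟩
        exact_mod_cast hcp
    rw [hset]
    omega

-- ===== VERDICT (by name: the statement is the Claim_ definition above) =====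
theorem part2_spec : Claim_equal_part2 := by
  intro pi _hdom hpre
  have hvalid : ∀ p ∈ parsedL pi.1, p.1 ≤ p.2 := by
    intro p hp
    obtain ⟨l, h⟩ := p
    obtain ⟨s, hs, hps⟩ := List.mem_filterMap.mp hp
    have hline := List.all_eq_true.mp hpre s hs
    rw [hps] at hline
    simpa using hline
  show part2 pi = part2_alt pi
  unfold part2 part2_alt
  simp only [foldl_parse_append, foldl_events_append, List.nil_append]
  rw [foldl_total_sumLen]
  have hperm : (PySem.List.sorted (parsedL pi.1) (fun x => x.1) false).Perm (parsedL pi.1) :=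
    PySem.List.sorted_perm _ _ _
  have hA : sumLen ((PySem.List.sorted (parsedL pi.1) (fun x => x.1) false).foldl mergeStep [])
      = ((U (parsedL pi.1)).card : Int) := by
    rw [merge_total _ (fun p hp => hvalid p (hperm.mem_iff.mp hp))
      (PySem.List.sorted_pairwise _ _), U_perm hperm]
  rw [hA, sweep_total _ hvalid]
  ring
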